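-- pv_equiv track=rewrite | github.com/luishenrique456/TDS_3 | DOT (desenvolvimento_orientado_teste)/lista 2 dot teste/q17_lista2.py | contador_ocorrecia
-- ===== SOURCE A (Python) =====
-- def contador_ocorrecia(lista_w : list[int],num : int):
--     if type(lista_w) != list or not all(isinstance(i,int)for i in lista_w) or len(lista_w) == 0:
--         return Exception
--     if type(num) != int:
--         return Exception
--
--     cont = 0
--     for i in lista_w:
--         if i == num:
--             cont += 1
--
--
--     posicao = lista_w.index(num)
--
--     return f'Seu número {num}\nQuantas repetiu {cont}\nSua Posição {posicao+1}'
-- ===== SOURCE B (Python) =====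
-- def _dc(seg, num):
--     # divide and conquer: returns (occurrences of num in seg, first index of num in seg or None)
--     if len(seg) == 0:
--         return (0, None)
--     if len(seg) == 1:
--         return (1, 0) if seg[0] == num else (0, None)
--     m = len(seg) // 2
--     cl, pl = _dc(seg[:m], num)
--     cr, pr = _dc(seg[m:], num)
--     pos = pl if pl is not None else (None if pr is None else pr + m)
--     return (cl + cr, pos)
--
--
-- def contador_ocorrecia(lista_w: list[int], num: int):
--     if type(lista_w) != list or type(num) != int:
--         return Exception
--     if not lista_w or any(not isinstance(i, int) for i in lista_w):
--         return Exception
--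
--     cont, posicao = _dc(lista_w, num)
--     if posicao is None:
--         raise ValueError(f'{num} is not in list')
--
--     return f'Seu número {num}\nQuantas repetiu {cont}\nSua Posição {posicao+1}'
-- ===== Notes on version B (the rewrite author's own statement) =====
-- stated objective: alternative
-- what changed: Replaces A's linear counting loop plus list.index scan with a divide-and-conquer recursion that splits the list in half and combines (count, first-position) pairs from the two halves.
import Mathlib
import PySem

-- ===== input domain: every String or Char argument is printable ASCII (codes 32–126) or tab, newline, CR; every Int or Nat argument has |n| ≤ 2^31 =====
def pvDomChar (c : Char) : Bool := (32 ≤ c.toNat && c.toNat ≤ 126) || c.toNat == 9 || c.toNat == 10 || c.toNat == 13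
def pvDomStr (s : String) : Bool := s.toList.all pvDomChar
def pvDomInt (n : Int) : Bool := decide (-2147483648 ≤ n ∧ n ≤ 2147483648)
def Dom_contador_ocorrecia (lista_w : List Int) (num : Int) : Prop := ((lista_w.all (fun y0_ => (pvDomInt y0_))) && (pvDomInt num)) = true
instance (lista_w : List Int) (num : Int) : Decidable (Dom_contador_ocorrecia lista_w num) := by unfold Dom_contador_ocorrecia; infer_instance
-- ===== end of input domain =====

-- B replaces A's counting loop + list.index scan with a divide-and-conquer recursion
-- over halves of the list; equivalence of return values on Pre_ (non-empty list containing num).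

-- ===== PORT A =====
def contador_ocorrecia (lista_w : List Int) (num : Int) : String :=
  -- the type-check guards are vacuous under the Lean types; 'return Exception' on the
  -- empty list is not a String value, so that input is outside Pre_ (port returns "")
  if lista_w.length == 0 then ""
  else
    let cont : Int := lista_w.foldl (fun c i => if i == num then c + 1 else c) 0
    match PySem.List.index? lista_w num with
    | none => ""   -- list.index raises ValueError here; outside Pre_
    | some posicao =>
        "Seu número " ++ PySem.Int.toStr num ++ "\nQuantas repetiu " ++ PySem.Int.toStr cont
          ++ "\nSua Posição " ++ PySem.Int.toStr ((posicao : Int) + 1)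

-- ===== PORT B =====
-- divide-and-conquer helper of Source B: (count, first position) of num in seg
def pvDC (num : Int) : List Int → Int × Option Nat
  | [] => (0, none)
  | [v] => if v == num then (1, some 0) else (0, none)
  | x :: y :: rest =>
      let m := (x :: y :: rest).length / 2
      let l := pvDC num ((x :: y :: rest).take m)
      let r := pvDC num ((x :: y :: rest).drop m)
      (l.1 + r.1, match l.2 with
                  | some p => some p
                  | none => r.2.map (· + m))
  termination_by seg => seg.length
  decreasing_by
  · simp [List.length_take]; omega
  · simp [List.length_drop]; omega

def contador_ocorrecia_alt (lista_w : List Int) (num : Int) : String :=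
  if lista_w.length == 0 then ""
  else
    match pvDC num lista_w with
    | (_, none) => ""   -- Source B raises ValueError here; outside Pre_
    | (cont, some posicao) =>
        "Seu número " ++ PySem.Int.toStr num ++ "\nQuantas repetiu " ++ PySem.Int.toStr cont
          ++ "\nSua Posição " ++ PySem.Int.toStr ((posicao : Int) + 1)

-- ===== PRECONDITION & SPEC =====
-- Pre_ excludes the empty list (A returns the Exception class, not a string) and
-- num ∉ lista_w (A's list.index raises ValueError; B raises ValueError too).
def Pre_contador_ocorrecia (lista_w : List Int) (num : Int) : Prop :=
  lista_w ≠ [] ∧ num ∈ lista_w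
instance (lista_w : List Int) (num : Int) : Decidable (Pre_contador_ocorrecia lista_w num) := by
  unfold Pre_contador_ocorrecia; infer_instance

def pvWitness_contador_ocorrecia : List Int × Int := ([3, 1, 3], 3)

def Spec_contador_ocorrecia (lista_w : List Int) (num : Int) (out : String) : Prop := out = contador_ocorrecia_alt lista_w num
instance (lista_w : List Int) (num : Int) (out : String) : Decidable (Spec_contador_ocorrecia lista_w num out) := by unfold Spec_contador_ocorrecia; infer_instance

-- ===== CLAIM (what is proved, stated in full; the proofs are below) =====
def Claim_equal_contador_ocorrecia : Prop := ∀ (lista_w : List Int) (num : Int), Dom_contador_ocorrecia lista_w num → Pre_contador_ocorrecia lista_w num → Spec_contador_ocorrecia lista_w num (contador_ocorrecia lista_w num)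

-- ===== LEMMAS AND PROOFS =====

lemma pv_count_shift (num : Int) (xs : List Int) : ∀ c : Int,
    xs.foldl (fun c i => if i == num then c + 1 else c) c
      = c + xs.foldl (fun c i => if i == num then c + 1 else c) 0 := by
  induction xs with
  | nil => intro c; simp
  | cons x xs ih =>
    intro c
    simp only [List.foldl_cons]
    rw [ih, ih (if x == num then 0 + 1 else 0)]
    split <;> ring

lemma pv_count_append (num : Int) (l r : List Int) :
    (l ++ r).foldl (fun c i => if i == num then c + 1 else c) (0 : Int)
      = l.foldl (fun c i => if i == num then c + 1 else c) 0
        + r.foldl (fun c i => if i == num then c + 1 else c) 0 := by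
  rw [List.foldl_append, pv_count_shift]

lemma pv_index?_append (num : Int) (l r : List Int) :
    PySem.List.index? (l ++ r) num
      = (match PySem.List.index? l num with
         | some p => some p
         | none => (PySem.List.index? r num).map (· + l.length)) := by
  induction l with
  | nil => simp [PySem.List.index?]
  | cons x l ih =>
    by_cases hx : x = num
    · subst hx
      rw [show (x :: l) ++ r = x :: (l ++ r) by rfl] at *
      rw [PySem.List.index?_cons_self, PySem.List.index?_cons_self]
    · rw [show (x :: l) ++ r = x :: (l ++ r) by rfl]
      rw [PySem.List.index?_cons_of_ne (l ++ r) hx, PySem.List.index?_cons_of_ne l hx, ih]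
      cases h : PySem.List.index? l num with
      | some p => simp
      | none =>
        cases h2 : PySem.List.index? r num with
        | none => simp
        | some q => simp; omega

lemma pv_dc_eq_aux (num : Int) : ∀ (n : Nat) (xs : List Int), xs.length ≤ n →
    pvDC num xs
      = (xs.foldl (fun c i => if i == num then c + 1 else c) 0,
         PySem.List.index? xs num) := by
  intro n
  induction n with
  | zero =>
    intro xs h
    have : xs = [] := List.eq_nil_of_length_eq_zero (Nat.le_zero.mp h)
    subst this
    simp [pvDC, PySem.List.index?]
  | succ n ih =>
    intro xs h
    match xs with
    | [] => simp [pvDC, PySem.List.index?]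
    | [v] =>
      by_cases hv : v = num
      · subst hv; simp [pvDC]
      · rw [show PySem.List.index? [v] num = (PySem.List.index? [] num).map (· + 1) from
              PySem.List.index?_cons_of_ne [] hv]
        simp [pvDC, hv, PySem.List.index?]
    | a :: b :: rest =>
      have hlen2 : 2 ≤ (a :: b :: rest).length := by simp
      have hm1 : 1 ≤ (a :: b :: rest).length / 2 := by omega
      have hm2 : (a :: b :: rest).length / 2 < (a :: b :: rest).length := by omega
      have htk : ((a :: b :: rest).take ((a :: b :: rest).length / 2)).length ≤ n := by
        rw [List.length_take]
        simp at h ⊢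
        omega
      have hdr : ((a :: b :: rest).drop ((a :: b :: rest).length / 2)).length ≤ n := by
        rw [List.length_drop]
        simp at h ⊢
        omega
      rw [pvDC]
      simp only [ih _ htk, ih _ hdr]
      have hsplit : (a :: b :: rest).take ((a :: b :: rest).length / 2)
          ++ (a :: b :: rest).drop ((a :: b :: rest).length / 2) = a :: b :: rest :=
        List.take_append_drop _ _
      have hlen : ((a :: b :: rest).take ((a :: b :: rest).length / 2)).length
          = (a :: b :: rest).length / 2 := by
        rw [List.length_take]; omega
      conv_rhs => rw [← hsplit]
      rw [pv_count_append, pv_index?_append, hlen]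

lemma pv_dc_eq (num : Int) (xs : List Int) :
    pvDC num xs
      = (xs.foldl (fun c i => if i == num then c + 1 else c) 0,
         PySem.List.index? xs num) :=
  pv_dc_eq_aux num xs.length xs le_rfl

-- ===== VERDICT (by name: the statement is the Claim_ definition above) =====
theorem contador_ocorrecia_spec : Claim_equal_contador_ocorrecia := by
  intro lista_w num _ hpre
  obtain ⟨hne, hmem⟩ := hpre
  unfold Spec_contador_ocorrecia contador_ocorrecia contador_ocorrecia_alt
  rw [pv_dc_eq]
  cases h : PySem.List.index? lista_w num with
  | none =>
    exact absurd hmem ((PySem.List.index?_eq_none_iff lista_w num).mp h)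
  | some k => simp
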